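-- pv_equiv track=rewrite | github.com/hvmanker/flask_chatbot | chatbot.py | extract_location_and_date
-- ===== SOURCE A (Python) =====
-- def extract_location_and_date(user_input):
--     # Split the user input by spaces
--     words = user_input.split()
--
--     # Initialize variables
--     location = ""
--     date = ""
--
--     # Iterate over the words to find the location and date
--     for i in range(len(words)):
--         # Check for location keywords
--         if words[i].lower() == "in":
--             if i + 1 < len(words):
--                 location = words[i + 1]
--                 break
--
--     # Iterate over the words to find the date
--     for i in range(len(words)):
--         # Check for date keywords
--         if words[i].lower() == "on":
--             if i + 1 < len(words):
--                 date = words[i + 1]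
--                 break
--
--     return location, date
-- ===== SOURCE B (Python) =====
-- def extract_location_and_date(user_input):
--     words = user_input.split()
--     location = ""
--     date = ""
--     # one pass over consecutive word pairs; zip drops a trailing keyword
--     # with no follower, and first occurrence wins
--     for w, nxt in zip(words, words[1:]):
--         kw = w.lower()
--         if kw == "in" and location == "":
--             location = nxt
--         elif kw == "on" and date == "":
--             date = nxt
--     return location, date
-- ===== Notes on version B (the rewrite author's own statement) =====
-- stated objective: simpler
-- what changed: Replaces A's two separate break-on-first-match index scans with one pass over consecutive word pairs zip(words, words[1:]) that fills location and date first-occurrence-wins.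
import Mathlib
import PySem

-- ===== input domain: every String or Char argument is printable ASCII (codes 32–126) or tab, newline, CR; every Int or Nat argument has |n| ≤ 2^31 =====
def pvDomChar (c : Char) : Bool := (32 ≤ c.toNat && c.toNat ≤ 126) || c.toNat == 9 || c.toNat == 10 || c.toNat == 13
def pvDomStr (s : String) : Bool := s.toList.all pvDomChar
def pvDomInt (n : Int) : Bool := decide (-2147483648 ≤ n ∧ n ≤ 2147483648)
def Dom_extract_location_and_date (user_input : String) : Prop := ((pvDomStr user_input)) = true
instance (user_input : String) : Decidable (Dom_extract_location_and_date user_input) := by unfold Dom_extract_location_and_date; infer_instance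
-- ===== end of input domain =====

-- B replaces A's two separate break-on-first-match index scans with one pass over
-- consecutive word pairs (zip words words[1:]), first occurrence wins: simpler, one traversal.


-- ===== PORT A =====
-- A's index loop 'for i in range(len(words)): if words[i].lower() == kw: if i+1 < len(words):
-- <set>; break' as structural recursion over the word list: at each word the same two checks
-- in the same order; 'break' returns the follower, otherwise the scan continues.
def pvFindAfter (kw : String) : List String → String
  | [] => ""
  | w :: rest =>
    if PySem.Str.lower w = kw then
      match rest with
      | next :: _ => next          -- i + 1 < len(words): take words[i+1] and break
      | [] => pvFindAfter kw rest  -- keyword is the last word: loop just runs out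
    else pvFindAfter kw rest

def extract_location_and_date (user_input : String) : String × String :=
  let words := PySem.Str.split₀ user_input
  let location := pvFindAfter "in" words   -- first loop
  let date := pvFindAfter "on" words       -- second loop
  (location, date)

-- ===== PORT B =====
-- one foldl over zip(words, words[1:]); state = (location, date), set on first match only
def extract_location_and_date_alt (user_input : String) : String × String :=
  let words := PySem.Str.split₀ user_input
  (words.zip (words.drop 1)).foldl
    (fun (st : String × String) (p : String × String) =>
      let kw := PySem.Str.lower p.1
      if kw = "in" ∧ st.1 = "" then (p.2, st.2)
      else if kw = "on" ∧ st.2 = "" then (st.1, p.2)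
      else st)
    ("", "")

-- ===== PRECONDITION & SPEC =====
def Spec_extract_location_and_date (user_input : String) (out : String × String) : Prop := out = extract_location_and_date_alt user_input
instance (user_input : String) (out : String × String) : Decidable (Spec_extract_location_and_date user_input out) := by unfold Spec_extract_location_and_date; infer_instance

-- ===== CLAIM (what is proved, stated in full; the proofs are below) =====
def Claim_equal_extract_location_and_date : Prop := ∀ (user_input : String), Dom_extract_location_and_date user_input → Spec_extract_location_and_date user_input (extract_location_and_date user_input)

-- ===== LEMMAS AND PROOFS =====

-- every piece produced by Chars.split₀.go with nonempty pieces accumulated is nonempty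
theorem pv_split₀_go_ne_nil (s cur acc) (hacc : ∀ p ∈ acc, p ≠ ([] : List Char)) :
    ∀ p ∈ PySem.Chars.split₀.go s cur acc, p ≠ [] := by
  induction s generalizing cur acc with
  | nil =>
    intro p hp
    simp only [PySem.Chars.split₀.go] at hp
    split at hp
    · exact hacc p (by simpa using hp)
    · rename_i hcur
      rcases (by simpa using hp : p ∈ acc ∨ p = cur.reverse) with hmem | heq
      · exact hacc p hmem
      · subst heq
        simpa [List.isEmpty_iff] using hcur
  | cons c rest ih =>
    intro p hp
    simp only [PySem.Chars.split₀.go] at hp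
    split at hp
    · split at hp
      · exact ih _ _ hacc p hp
      · rename_i hcur
        refine ih _ _ ?_ p hp
        intro q hq
        rcases List.mem_cons.mp hq with heq | hmem
        · subst heq; simpa [List.isEmpty_iff] using hcur
        · exact hacc q hmem
    · exact ih _ _ hacc p hp

theorem pv_split₀_words_ne (s : String) : ∀ w ∈ PySem.Str.split₀ s, w ≠ "" := by
  intro w hw
  simp only [PySem.Str.split₀, List.mem_map] at hw
  obtain ⟨l, hl, rfl⟩ := hw
  have hne : l ≠ [] := pv_split₀_go_ne_nil _ _ _ (by simp) l hl
  intro h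
  apply hne
  have : (String.ofList l).toList = ("" : String).toList := by rw [h]
  simpa using this

-- the pairwise fold from any state equals the two first-match scans (fields already set stay)
theorem pv_fold_zip_eq (ws : List String) (l d : String) (h : ∀ w ∈ ws, w ≠ "") :
    (ws.zip (ws.drop 1)).foldl
      (fun (st : String × String) (p : String × String) =>
        if PySem.Str.lower p.1 = "in" ∧ st.1 = "" then (p.2, st.2)
        else if PySem.Str.lower p.1 = "on" ∧ st.2 = "" then (st.1, p.2)
        else st)
      (l, d)
    = ((if l = "" then pvFindAfter "in" ws else l),
       (if d = "" then pvFindAfter "on" ws else d)) := by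
  induction ws generalizing l d with
  | nil => simp [pvFindAfter]
  | cons w t ih =>
    cases t with
    | nil =>
      simp only [List.drop, List.zip_nil_right, List.foldl_nil, pvFindAfter]
      split_ifs <;> simp_all [pvFindAfter]
    | cons n rest =>
      have hn : n ≠ "" := h n (by simp)
      have ht : ∀ w ∈ n :: rest, w ≠ "" := fun w hw => h w (List.mem_cons_of_mem _ hw)
      have ih' := fun l d => ih l d ht
      simp only [List.drop_one, List.tail_cons] at ih' ⊢
      rw [List.zip_cons_cons, List.foldl_cons]
      by_cases hw_in : PySem.Str.lower w = "in"
      · have hw_on : PySem.Str.lower w ≠ "on" := by rw [hw_in]; decide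
        by_cases hl : l = ""
        · rw [if_pos ⟨hw_in, hl⟩, ih' n d]
          simp [pvFindAfter, hw_in, hn, hl]
        · rw [if_neg (by tauto), if_neg (by tauto), ih' l d]
          simp [pvFindAfter, hw_in, hl]
      · by_cases hw_on : PySem.Str.lower w = "on"
        · by_cases hd : d = ""
          · rw [if_neg (by tauto), if_pos ⟨hw_on, hd⟩, ih' l n]
            simp [pvFindAfter, hw_on, hn, hd]
          · rw [if_neg (by tauto), if_neg (by tauto), ih' l d]
            simp [pvFindAfter, hw_on, hd]
        · rw [if_neg (by tauto), if_neg (by tauto), ih' l d]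
          simp [pvFindAfter, hw_in, hw_on]

-- ===== VERDICT (by name: the statement is the Claim_ definition above) =====
theorem extract_location_and_date_spec : Claim_equal_extract_location_and_date := by
  intro user_input _
  unfold Spec_extract_location_and_date extract_location_and_date extract_location_and_date_alt
  simp only []
  rw [pv_fold_zip_eq _ _ _ (pv_split₀_words_ne user_input)]
  simp
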